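-- pv_equiv track=rewrite | github.com/harrider/aoc-2025 | _aoc-tasks/day-02/aoc-day-02.py | find_invalid_ids_in_range
-- ===== SOURCE A (Python) =====
-- from math import ceil
-- from typing import List, Tuple, Optional, Set
--
-- def get_repetition_multiplier(k: int, r: int) -> int:
--     """
--     Get the multiplier M for a k-digit base repeated r times.
--     M = 10^(k*(r-1)) + 10^(k*(r-2)) + ... + 10^k + 1 = (10^(k*r) - 1) / (10^k - 1)
--     """
--     return (10 ** (k * r) - 1) // (10 ** k - 1)
--
-- def get_base_bounds_for_repetition(k: int, r: int, start: int, end: int) -> Optional[Tuple[int, int, int]]: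
--     """
--     Get range of k-digit bases that, when repeated r times, fall within [start, end].
--     Returns (base_min, base_max, multiplier) or None if no valid bases exist.
--     """
--     M = get_repetition_multiplier(k, r)
--
--     # k-digit bases: 10^(k-1) to 10^k - 1 (or 1-9 for k=1)
--     base_lo = 1 if k == 1 else 10 ** (k - 1)
--     base_hi = 10 ** k - 1
--
--     # Clamp to bases whose repeated form falls in [start, end]
--     base_min = max(base_lo, ceil(start / M))
--     base_max = min(base_hi, end // M)
--
--     return (base_min, base_max, M) if base_min <= base_max else None
--
-- def find_invalid_ids_in_range(start: int, end: int) -> List[int]: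
--     """List all Part 1 invalid IDs within [start, end]. Used for testing."""
--     ids = []
--     max_k = (len(str(end)) + 1) // 2
--
--     for k in range(1, max_k + 1):
--         bounds = get_base_bounds_for_repetition(k, 2, start, end)
--         if bounds:
--             base_min, base_max, M = bounds
--             ids.extend(base * M for base in range(base_min, base_max + 1))
--
--     return ids
-- ===== SOURCE B (Python) =====
-- def find_invalid_ids_in_range(start: int, end: int) -> list:
--     """List all Part 1 invalid IDs within [start, end]. Used for testing."""
--     ids = []
--     max_k = (len(str(end)) + 1) // 2
--     for k in range(1, max_k + 1):
--         lo = 1 if k == 1 else 10 ** (k - 1)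
--         for base in range(lo, 10 ** k):
--             n = base * 10 ** k + base
--             if start <= n <= end:
--                 ids.append(n)
--     return ids
-- ===== Notes on version B (the rewrite author's own statement) =====
-- stated objective: simpler
-- what changed: B drops both helper functions and the arithmetic bound-clamping (ceil/floor division, min/max) entirely: for each digit count k it simply enumerates every k-digit base, forms the doubled number n = base*10**k + base, and keeps n iff start <= n <= end, appending one at a time instead of extending with a precomputed clamped range.
import Mathlib
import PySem

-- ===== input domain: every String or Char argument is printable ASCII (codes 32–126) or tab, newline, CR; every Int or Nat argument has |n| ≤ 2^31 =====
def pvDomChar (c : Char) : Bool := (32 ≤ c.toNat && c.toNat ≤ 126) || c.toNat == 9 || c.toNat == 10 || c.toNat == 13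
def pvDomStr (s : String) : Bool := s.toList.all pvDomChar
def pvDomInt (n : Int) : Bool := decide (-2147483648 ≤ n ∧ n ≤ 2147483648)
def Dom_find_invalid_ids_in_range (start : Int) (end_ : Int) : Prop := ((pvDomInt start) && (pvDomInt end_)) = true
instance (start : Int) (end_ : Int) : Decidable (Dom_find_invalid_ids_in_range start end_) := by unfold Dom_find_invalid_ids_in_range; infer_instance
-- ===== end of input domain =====

-- ===== PORT A =====
-- B drops the helper functions and the arithmetic bound clamping: it enumerates every
-- k-digit base and filters by range membership (simpler; not faster).
-- Python's math.ceil(start / M) uses float division; on the stated domain (|start| <= 2^31 < 2^53,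
-- M >= 11) it equals exact integer ceiling division -((-start) // M), which is how it is ported.
def get_repetition_multiplier (k r : Int) : Int :=
  PySem.Int.floordiv (10 ^ (k * r).toNat - 1) (10 ^ k.toNat - 1)

def get_base_bounds_for_repetition (k r : Int) (start : Int) (end_ : Int) :
    Option (Int × Int × Int) :=
  let M := get_repetition_multiplier k r
  let base_lo : Int := if k = 1 then 1 else 10 ^ (k - 1).toNat
  let base_hi : Int := 10 ^ k.toNat - 1
  let base_min := max base_lo (-(PySem.Int.floordiv (-start) M))  -- ceil(start / M), exact here
  let base_max := min base_hi (PySem.Int.floordiv end_ M)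
  if base_min ≤ base_max then some (base_min, base_max, M) else none

def find_invalid_ids_in_range (start : Int) (end_ : Int) : List Int :=
  let max_k := PySem.Int.floordiv (PySem.Str.len (PySem.Int.toStr end_) + 1) 2
  (PySem.List.pyRange 1 (max_k + 1) 1).foldl (fun ids k =>
    match get_base_bounds_for_repetition k 2 start end_ with
    | some (base_min, base_max, M) =>
        ids ++ (PySem.List.pyRange base_min (base_max + 1) 1).map (fun base => base * M)
    | none => ids) []

-- ===== PORT B =====
-- (every k drawn from the outer range satisfies 1 ≤ k, so 10 ** k is ported via k.toNat)
def find_invalid_ids_in_range_alt (start : Int) (end_ : Int) : List Int :=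
  let max_k := PySem.Int.floordiv (PySem.Str.len (PySem.Int.toStr end_) + 1) 2
  (PySem.List.pyRange 1 (max_k + 1) 1).foldl (fun ids k =>
    let lo : Int := if k = 1 then 1 else 10 ^ (k - 1).toNat
    (PySem.List.pyRange lo (10 ^ k.toNat) 1).foldl (fun ids base =>
      let n := base * 10 ^ k.toNat + base
      if start ≤ n ∧ n ≤ end_ then ids ++ [n] else ids) ids) []

-- ===== PRECONDITION & SPEC =====
def Spec_find_invalid_ids_in_range (start : Int) (end_ : Int) (out : List Int) : Prop := out = find_invalid_ids_in_range_alt start end_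
instance (start : Int) (end_ : Int) (out : List Int) : Decidable (Spec_find_invalid_ids_in_range start end_ out) := by unfold Spec_find_invalid_ids_in_range; infer_instance

-- ===== CLAIM (what is proved, stated in full; the proofs are below) =====
def Claim_equal_find_invalid_ids_in_range : Prop := ∀ (start : Int) (end_ : Int), Dom_find_invalid_ids_in_range start end_ → Spec_find_invalid_ids_in_range start end_ (find_invalid_ids_in_range start end_)

-- ===== LEMMAS AND PROOFS =====

-- ceiling division bracket: -((-a) // M) ≤ b ↔ a ≤ b * M
theorem pv_ceil_le_iff (a M b : Int) (hM : 0 < M) :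
    -(PySem.Int.floordiv (-a) M) ≤ b ↔ a ≤ b * M := by
  obtain ⟨h1, h2⟩ := (PySem.Int.neg_floordiv_neg_eq_iff_of_pos (a := a)
    (q := -(PySem.Int.floordiv (-a) M)) hM).mp rfl
  constructor
  · intro h; nlinarith
  · intro h; by_contra hb; push Not at hb; nlinarith

-- filtering an increasing unit range by an interval condition yields the clamped range
theorem pv_filter_pyRange (c e lo hi : Int) :
    (PySem.List.pyRange lo hi 1).filter (fun x => decide (c ≤ x ∧ x < e)) =
      PySem.List.pyRange (max lo c) (min hi e) 1 := by
  obtain ⟨n, hn⟩ : ∃ n : Nat, (hi - lo).toNat = n := ⟨_, rfl⟩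
  induction n generalizing lo with
  | zero =>
    rw [PySem.List.pyRange_one_eq_nil (by omega : hi ≤ lo),
        PySem.List.pyRange_one_eq_nil (by omega : min hi e ≤ max lo c)]
    rfl
  | succ n ih =>
    have hlt : lo < hi := by omega
    rw [PySem.List.pyRange_one_cons hlt, List.filter_cons, ih (lo + 1) (by omega)]
    by_cases h1 : c ≤ lo ∧ lo < e
    · rw [if_pos (decide_eq_true h1)]
      have hmax : max (lo + 1) c = lo + 1 := by omega
      have hmax0 : max lo c = lo := by omega
      rw [hmax, hmax0, ← PySem.List.pyRange_one_cons (by omega : lo < min hi e)]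
    · rw [if_neg (by simp [decide_eq_false h1])]
      by_cases h2 : c ≤ lo
      · have he : e ≤ lo := by omega
        rw [PySem.List.pyRange_one_eq_nil (by omega : min hi e ≤ max lo c),
            PySem.List.pyRange_one_eq_nil (by omega : min hi e ≤ max (lo + 1) c)]
      · have : max lo c = max (lo + 1) c := by omega
        rw [this]

-- the one-k step of A equals the one-k step of B
theorem pv_step_eq (start end_ k : Int) (hk : 1 ≤ k) (ids : List Int) :
    (match get_base_bounds_for_repetition k 2 start end_ with
     | some (base_min, base_max, M) =>
         ids ++ (PySem.List.pyRange base_min (base_max + 1) 1).map (fun base => base * M)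
     | none => ids) =
    (PySem.List.pyRange (if k = 1 then (1 : Int) else 10 ^ (k - 1).toNat)
        (10 ^ k.toNat) 1).foldl (fun ids base =>
      let n := base * 10 ^ k.toNat + base
      if start ≤ n ∧ n ≤ end_ then ids ++ [n] else ids) ids := by
  -- the multiplier is 10^k + 1
  have hK : 1 ≤ k.toNat := by omega
  have hpow : (0 : Int) < 10 ^ k.toNat - 1 := by
    have : (10 : Int) ^ 1 ≤ 10 ^ k.toNat := pow_le_pow_right₀ (by norm_num) hK
    omega
  have hM : get_repetition_multiplier k 2 = 10 ^ k.toNat + 1 := by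
    unfold get_repetition_multiplier
    have h2k : (k * 2).toNat = k.toNat + k.toNat := by omega
    have hfac : (10 : Int) ^ (k * 2).toNat - 1 =
        (10 ^ k.toNat - 1) * (10 ^ k.toNat + 1) := by rw [h2k, pow_add]; ring
    rw [hfac, PySem.Int.floordiv_eq_ediv_of_pos hpow, Int.mul_ediv_cancel_left _ (by omega)]
  have hMpos : (0 : Int) < 10 ^ k.toNat + 1 := by positivity
  set c := -(PySem.Int.floordiv (-start) (10 ^ k.toNat + 1)) with hc
  set d := PySem.Int.floordiv end_ (10 ^ k.toNat + 1) with hd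
  set lo : Int := if k = 1 then (1 : Int) else 10 ^ (k - 1).toNat with hlo
  -- rewrite B's inner loop as a filtered map
  rw [show (fun (ids : List Int) (base : Int) =>
        let n := base * 10 ^ k.toNat + base
        if start ≤ n ∧ n ≤ end_ then ids ++ [n] else ids) =
      (fun ids base =>
        if (fun b => decide (start ≤ b * 10 ^ k.toNat + b ∧ b * 10 ^ k.toNat + b ≤ end_)) base
          then ids ++ [(fun b => b * 10 ^ k.toNat + b) base] else ids) from by
        funext ids b; simp]
  rw [PySem.List.foldl_append_if]
  -- turn the membership test into an interval test on the base
  rw [List.filter_congr (fun b _ => by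
    show decide (start ≤ b * 10 ^ k.toNat + b ∧ b * 10 ^ k.toNat + b ≤ end_) =
      decide (c ≤ b ∧ b < d + 1)
    apply decide_eq_decide.mpr
    have h1 := pv_ceil_le_iff start (10 ^ k.toNat + 1) b hMpos
    have h2 := (PySem.Int.le_floordiv_iff_mul_le (a := end_) (q := b) hMpos)
    have hid : b * (10 ^ k.toNat + 1) = b * 10 ^ k.toNat + b := by ring
    rw [hc, hd]
    constructor
    · rintro ⟨ha, hb⟩
      refine ⟨h1.mpr (by rw [hid]; exact ha), ?_⟩
      have := h2.mpr (by rw [hid]; exact hb)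
      omega
    · rintro ⟨ha, hb⟩
      have ha' := h1.mp ha
      have hb' := h2.mp (by omega)
      rw [hid] at ha' hb'
      exact ⟨ha', hb'⟩)]
  rw [pv_filter_pyRange]
  -- evaluate A's bound computation
  have hbounds : get_base_bounds_for_repetition k 2 start end_ =
      if max lo c ≤ min (10 ^ k.toNat - 1) d
        then some (max lo c, min (10 ^ k.toNat - 1) d, 10 ^ k.toNat + 1) else none := by
    unfold get_base_bounds_for_repetition
    rw [hM]
  rw [hbounds]
  by_cases hcase : max lo c ≤ min (10 ^ k.toNat - 1) d
  · rw [if_pos hcase]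
    dsimp only
    have : min (10 ^ k.toNat - 1) d + 1 = min (10 ^ k.toNat) (d + 1) := by omega
    rw [this]
    congr 1
    apply List.map_congr_left
    intro b _
    ring
  · rw [if_neg hcase]
    dsimp only
    rw [PySem.List.pyRange_one_eq_nil (by omega : min (10 ^ k.toNat) (d + 1) ≤ max lo c)]
    simp

-- ===== VERDICT (by name: the statement is the Claim_ definition above) =====
theorem find_invalid_ids_in_range_spec : Claim_equal_find_invalid_ids_in_range := by
  intro start end_ _
  show find_invalid_ids_in_range start end_ = find_invalid_ids_in_range_alt start end_
  unfold find_invalid_ids_in_range find_invalid_ids_in_range_alt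
  apply List.foldl_ext
  intro ids k hk
  have hk1 : 1 ≤ k := (PySem.List.mem_pyRange_one.mp hk).1
  exact pv_step_eq start end_ k hk1 ids
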